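-- pv_equiv track=rewrite | github.com/sunhuaiyu/rosalind | rosalind_strings.py | shortest_non_shared_substring
-- ===== SOURCE A (Python) =====
-- def shortest_non_shared_substring(s1, s2):
--     length   = len(s1)
--     shortest = []
--
--     for i in range(1, length):
--         for j in range(length - i + 1):
--             s = s1[j:j + i]
--             if not s in s2 and not s in shortest:
--                 shortest.append(s)
--         if shortest: break
--
--     return sorted(shortest)[0]
-- ===== SOURCE B (Python) =====
-- def shortest_non_shared_substring(s1, s2):
--     # Per-start greedy: for each start j, extend until the substring is absent
--     # from s2 (prefix-closedness of occurrence makes that the shortest absent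
--     # substring starting at j), keeping the best (length, string) pair seen.
--     n = len(s1)
--     best = None
--     for j in range(n):
--         L = 1
--         while L <= n - j and s1[j:j+L] in s2:
--             L += 1
--         if L <= n - j:
--             cand = (L, s1[j:j+L])
--             if best is None or cand < best:
--                 best = cand
--     if best is None:
--         raise ValueError("every substring of s1 occurs in s2")
--     return best[1]
-- ===== Notes on version B (the rewrite author's own statement) =====
-- stated objective: alternative
-- what changed: B traverses by start position instead of by length: for each start j it greedily extends the substring until it is absent from s2 (valid since occurrence is prefix-closed) and folds the candidates into one running best (length, string) pair, replacing A's per-length breadth scans with a dedup list, repeated full re-scans and a final sort; A's IndexError region (no proper substring absent) is outside Pre_.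
import Mathlib
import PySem

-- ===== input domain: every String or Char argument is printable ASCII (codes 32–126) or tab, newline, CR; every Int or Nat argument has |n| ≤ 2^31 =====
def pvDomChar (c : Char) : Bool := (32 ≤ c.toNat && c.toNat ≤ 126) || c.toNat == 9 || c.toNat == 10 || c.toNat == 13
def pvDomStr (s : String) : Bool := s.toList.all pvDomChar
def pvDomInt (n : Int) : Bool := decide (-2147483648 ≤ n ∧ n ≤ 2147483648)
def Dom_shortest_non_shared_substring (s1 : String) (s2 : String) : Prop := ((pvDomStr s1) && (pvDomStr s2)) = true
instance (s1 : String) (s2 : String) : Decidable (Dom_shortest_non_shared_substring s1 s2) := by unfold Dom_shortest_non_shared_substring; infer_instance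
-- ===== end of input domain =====

-- B replaces A's per-length breadth scans with dedup list and sort by a per-start greedy
-- extension (shortest absent substring starting at each position) folded into one running
-- best (length, string) pair (objective: alternative; return value only).

-- ===== PORT A =====
-- inner 'for j in range(length - i + 1): …'
def pvAInner (s1L s2L : List Char) (length i : Int) (shortest : List (List Char)) : List (List Char) :=
  (PySem.List.pyRange 0 (length - i + 1) 1).foldl
    (fun shortest j =>
      let s := PySem.List.slice s1L (some j) (some (j + i))
      if !PySem.Chars.isIn s s2L && !shortest.contains s then shortest ++ [s] else shortest)
    shortest

-- outer 'for i in range(1, length): … ; if shortest: break'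
def pvAOuter (s1L s2L : List Char) (length : Int) : List Int → List (List Char) → List (List Char)
  | [], shortest => shortest
  | i :: rest, shortest =>
      let shortest' := pvAInner s1L s2L length i shortest
      if shortest'.isEmpty then pvAOuter s1L s2L length rest shortest' else shortest'

def shortest_non_shared_substring (s1 : String) (s2 : String) : String :=
  let s1L := s1.toList
  let s2L := s2.toList
  let length := PySem.Chars.len s1L
  let shortest := pvAOuter s1L s2L length (PySem.List.pyRange 1 length 1) []
  -- sorted(shortest)[0]; Python raises IndexError when shortest == [] — those inputs are outside Pre_
  String.ofList ((PySem.List.pyGet? (PySem.List.sorted shortest (fun x => x) false) 0).getD [])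

-- ===== PORT B =====
-- Python tuple comparison 'cand < best' on (int, str): first component, then the string
def pvPairLt (a b : Nat × List Char) : Bool :=
  a.1 < b.1 || (a.1 == b.1 && decide (a.2 < b.2))

-- 'L = 1; while L <= n - j and s1[j:j+L] in s2: L += 1'; fuel n suffices (L ≤ n - j + 1 always);
-- the slice s1[j:j+L] with 0 ≤ j, 0 ≤ L is exactly (s1L.drop j).take L
def pvExtend (s1L s2L : List Char) (j : Nat) : Nat → Nat → Nat
  | 0, L => L
  | f + 1, L =>
      if L + j ≤ s1L.length ∧ PySem.Chars.isIn ((s1L.drop j).take L) s2L = true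
      then pvExtend s1L s2L j f (L + 1) else L

def shortest_non_shared_substring_alt (s1 : String) (s2 : String) : String :=
  let s1L := s1.toList
  let s2L := s2.toList
  let n := s1L.length
  -- 'for j in range(n): … if best is None or cand < best: best = cand'
  let best := (List.range n).foldl (fun best j =>
      let L := pvExtend s1L s2L j n 1
      if L + j ≤ n then
        let cand : Nat × List Char := (L, (s1L.drop j).take L)
        match best with
        | none => some cand
        | some b => if pvPairLt cand b then some cand else some b
      else best) (none : Option (Nat × List Char))
  -- Python B raises ValueError when best is None — those inputs are outside Pre_
  String.ofList ((best.map Prod.snd).getD [])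

-- ===== PRECONDITION & SPEC =====
-- Pre_ excludes exactly the inputs on which A raises IndexError on sorted([])[0]: those where every
-- non-empty proper-length contiguous substring of s1 occurs in s2 (in particular len(s1) ≤ 1).
def Pre_shortest_non_shared_substring (s1 : String) (s2 : String) : Prop :=
  ∃ i < s1.toList.length, 0 < i ∧
    ∃ j < s1.toList.length + 1 - i, ¬ ((s1.toList.drop j).take i <:+: s2.toList)
instance (s1 : String) (s2 : String) : Decidable (Pre_shortest_non_shared_substring s1 s2) := by
  unfold Pre_shortest_non_shared_substring; infer_instance

def pvWitness_shortest_non_shared_substring : String × String := ("ab", "b")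

def Spec_shortest_non_shared_substring (s1 : String) (s2 : String) (out : String) : Prop := out = shortest_non_shared_substring_alt s1 s2
instance (s1 : String) (s2 : String) (out : String) : Decidable (Spec_shortest_non_shared_substring s1 s2 out) := by unfold Spec_shortest_non_shared_substring; infer_instance

-- ===== CLAIM (what is proved, stated in full; the proofs are below) =====
def Claim_equal_shortest_non_shared_substring : Prop := ∀ (s1 : String) (s2 : String), Dom_shortest_non_shared_substring s1 s2 → Pre_shortest_non_shared_substring s1 s2 → Spec_shortest_non_shared_substring s1 s2 (shortest_non_shared_substring s1 s2)

-- ===== LEMMAS AND PROOFS =====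

-- the length-i contiguous substrings of xs, in position order
def pvCands (xs : List Char) (i : Nat) : List (List Char) :=
  (List.range (xs.length + 1 - i)).map (fun j => (xs.drop j).take i)

-- the length-i substrings of s1L that do not occur in s2L (with repetitions, in position order)
def pvAbsent (s1L s2L : List Char) (i : Nat) : List (List Char) :=
  (pvCands s1L i).filter (fun s => !(PySem.Chars.isIn s s2L))

-- the stream of slices A draws its candidates from is pvCands
theorem pvStream_eq (xs : List Char) (i : Nat) :
    (PySem.List.pyRange 0 ((xs.length : Int) - (i : Int) + 1) 1).map
      (fun j => PySem.List.slice xs (some j) (some (j + (i : Int)))) = pvCands xs i := by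
  rw [PySem.List.pyRange_one, List.map_map, pvCands]
  have h : ((xs.length : Int) - (i : Int) + 1 - 0).toNat = xs.length + 1 - i := by omega
  rw [h]
  refine List.map_congr_left ?_
  intro k hk
  simp only [Function.comp, zero_add]
  exact PySem.List.slice_natCast_add xs k i

-- A's dedup-append loop over a stream of slices builds init.update(filtered stream)
theorem pvFoldl_dedup {β : Type} (f : β → List Char) (p : List Char → Bool)
    (l : List β) (init : List (List Char)) :
    l.foldl (fun acc j =>
        let s := f j
        if p s && !acc.contains s then acc ++ [s] else acc) init
      = PySem.Set.update init ((l.map f).filter p) := by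
  induction l generalizing init with
  | nil => simp [PySem.Set.update]
  | cons j l ih =>
    simp only [List.foldl_cons, List.map_cons, List.filter_cons]
    cases hp : p (f j) with
    | false =>
      rw [if_neg (by simp [hp]), if_neg (by simp [hp])]
      exact ih init
    | true =>
      cases hc : init.contains (f j) with
      | false =>
        rw [if_pos (by simp [hp, hc, List.contains_iff_mem]), if_pos (by simp [hp]),
          PySem.Set.update_cons]
        have hadd : PySem.Set.add init (f j) = init ++ [f j] := by
          have hc' : PySem.Set.contains init (f j) = false := hc
          simp only [PySem.Set.add, hc']
          simp
        rw [hadd]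
        exact ih _
      | true =>
        rw [if_neg (by simp [hp, hc, List.contains_iff_mem]), if_pos (by simp [hp]),
          PySem.Set.update_cons]
        have hadd : PySem.Set.add init (f j) = init := by
          have hc' : PySem.Set.contains init (f j) = true := hc
          simp only [PySem.Set.add, hc']
          simp
        rw [hadd]
        exact ih init

-- A's inner loop from the empty accumulator builds set(pvAbsent) in first-appearance order
theorem pvAInner_eq (s1L s2L : List Char) (i : Nat) :
    pvAInner s1L s2L (s1L.length : Int) (i : Int) [] = PySem.Set.ofList (pvAbsent s1L s2L i) := by
  unfold pvAInner
  rw [pvFoldl_dedup (f := fun j => PySem.List.slice s1L (some j) (some (j + (i:Int))))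
      (p := fun s => !PySem.Chars.isIn s s2L), pvStream_eq, PySem.Set.update_nil_left, pvAbsent]

-- Python's str '<' on these lists is the Lex order; pvLtIff bridges the two LT instances on
-- List Char so that the PySem order lemmas (stated over LinearOrder) apply to the ports' terms
theorem pvLtIff (a b : List Char) :
    a < b ↔ @LT.lt (List Char) LinearOrder.toPartialOrder.toLT a b := by
  constructor
  · intro h; exact (List.lt_iff_lex_lt a b).mp h
  · intro h; exact (List.lt_iff_lex_lt a b).mpr h

theorem pvMin_congr (xs : List (List Char)) :
    PySem.List.min? xs (fun x => x)
      = @PySem.List.min? (List Char) (List Char) LinearOrder.toPartialOrder.toLT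
          LinearOrder.toDecidableLT xs (fun x => x) := by
  unfold PySem.List.min?
  congr 1
  funext acc x
  cases acc with
  | none => rfl
  | some m =>
    show (if x < m then some x else some m)
      = @ite _ (@LT.lt (List Char) LinearOrder.toPartialOrder.toLT x m)
          (LinearOrder.toDecidableLT x m) (some x) (some m)
    by_cases h : x < m
    · rw [if_pos h, if_pos ((pvLtIff x m).mp h)]
    · rw [if_neg h, if_neg (fun hh => h ((pvLtIff x m).mpr hh))]

theorem pvSorted_congr (xs : List (List Char)) :
    PySem.List.sorted xs (fun x => x) false
      = @PySem.List.sorted (List Char) (List Char) LinearOrder.toPartialOrder.toLT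
          LinearOrder.toDecidableLT xs (fun x => x) false := by
  rw [PySem.List.sorted_eq_foldl_insertBy,
    @PySem.List.sorted_eq_foldl_insertBy (List Char) (List Char) LinearOrder.toPartialOrder.toLT
      LinearOrder.toDecidableLT xs (fun x => x)]
  congr 1
  funext acc x
  congr 1
  funext a b
  exact decide_eq_decide.mpr (pvLtIff a b)

theorem pvSortedHead_eq_min (xs : List (List Char)) (hxs : xs ≠ []) :
    (PySem.List.pyGet? (PySem.List.sorted (PySem.Set.ofList xs) (fun x => x) false) 0).getD []
      = (PySem.List.min? xs (fun x => x)).getD [] := by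
  rw [pvSorted_congr, pvMin_congr]
  have hof : PySem.Set.ofList xs ≠ [] := by
    obtain ⟨a, ha⟩ := List.exists_mem_of_ne_nil xs hxs
    exact List.ne_nil_of_mem ((PySem.Set.mem_ofList _ _).mpr ha)
  cases hs : @PySem.List.sorted (List Char) (List Char) LinearOrder.toPartialOrder.toLT
      LinearOrder.toDecidableLT (PySem.Set.ofList xs) (fun x => x) false with
  | nil =>
    exact absurd ((@PySem.List.sorted_eq_nil_iff (List Char) (List Char)
      LinearOrder.toPartialOrder.toLT LinearOrder.toDecidableLT
      (PySem.Set.ofList xs) (fun x => x) false).mp hs) hof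
  | cons mhd tl =>
    cases hm : @PySem.List.min? (List Char) (List Char) LinearOrder.toPartialOrder.toLT
        LinearOrder.toDecidableLT xs (fun x => x) with
    | none =>
      exact absurd ((@PySem.List.min?_eq_none_iff (List Char) (List Char)
        LinearOrder.toPartialOrder.toLT LinearOrder.toDecidableLT xs (fun x => x)).mp hm) hxs
    | some v =>
      have hmhd_mem : mhd ∈ xs := by
        have hms : mhd ∈ @PySem.List.sorted (List Char) (List Char)
            LinearOrder.toPartialOrder.toLT LinearOrder.toDecidableLT
            (PySem.Set.ofList xs) (fun x => x) false := by
          rw [hs]; exact List.mem_cons_self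
        exact (PySem.Set.mem_ofList _ _).mp ((@PySem.List.mem_sorted (List Char) (List Char)
          LinearOrder.toPartialOrder.toLT LinearOrder.toDecidableLT
          (PySem.Set.ofList xs) (fun x => x) false mhd).mp hms)
      have hv_mem : v ∈ xs := @PySem.List.min?_mem (List Char) (List Char)
        LinearOrder.toPartialOrder.toLT LinearOrder.toDecidableLT xs (fun x => x) v hm
      have h1 : mhd ≤ v := by
        have := PySem.List.key_head_sorted_le (PySem.Set.ofList xs) (fun x => x) hs v
          ((PySem.Set.mem_ofList xs v).mpr hv_mem)
        simpa using this
      have h2 : v ≤ mhd := by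
        have := PySem.List.min?_isMin hm mhd hmhd_mem
        simpa using this
      have : mhd = v := le_antisymm h1 h2
      subst this
      simp [PySem.List.pyGet?, PySem.List.pyIdx?]

-- ---- A side: the first level with an absent substring ----

def pvFirstLevel (s1L s2L : List Char) : List Int → Nat
  | [] => 0
  | i :: rest =>
      if (pvAbsent s1L s2L i.toNat).isEmpty then pvFirstLevel s1L s2L rest else i.toNat

-- A's outer loop (from []) stops at the first level with an absent substring
theorem pvAOuter_eq_firstLevel (s1L s2L : List Char) (l : List Int)
    (hl : ∀ i ∈ l, 1 ≤ i) (hex : ∃ i ∈ l, pvAbsent s1L s2L i.toNat ≠ []) :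
    pvAOuter s1L s2L (s1L.length : Int) l []
      = PySem.Set.ofList (pvAbsent s1L s2L (pvFirstLevel s1L s2L l)) := by
  induction l with
  | nil => obtain ⟨i, hi, _⟩ := hex; cases hi
  | cons i rest ih =>
    have hi1 : 1 ≤ i := hl i List.mem_cons_self
    have hiN : i = ((i.toNat : Nat) : Int) := (Int.toNat_of_nonneg (by omega)).symm
    simp only [pvAOuter, pvFirstLevel]
    have hInner : pvAInner s1L s2L (s1L.length : Int) i []
        = PySem.Set.ofList (pvAbsent s1L s2L i.toNat) := by
      rw [hiN]; exact pvAInner_eq s1L s2L i.toNat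
    rw [hInner]
    by_cases habs : pvAbsent s1L s2L i.toNat = []
    · have hof : PySem.Set.ofList (pvAbsent s1L s2L i.toNat) = [] := by rw [habs]; rfl
      rw [hof]
      have hex' : ∃ i' ∈ rest, pvAbsent s1L s2L i'.toNat ≠ [] := by
        obtain ⟨i', hi', hne⟩ := hex
        rcases List.mem_cons.mp hi' with h | h
        · exact absurd (h ▸ habs) hne
        · exact ⟨i', h, hne⟩
      rw [if_pos (by rfl : ([] : List (List Char)).isEmpty = true),
        if_pos (by rw [habs]; rfl : (pvAbsent s1L s2L i.toNat).isEmpty = true)]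
      exact ih (fun x hx => hl x (List.mem_cons_of_mem _ hx)) hex'
    · have hof : PySem.Set.ofList (pvAbsent s1L s2L i.toNat) ≠ [] := by
        obtain ⟨a, ha⟩ := List.exists_mem_of_ne_nil _ habs
        exact List.ne_nil_of_mem ((PySem.Set.mem_ofList _ _).mpr ha)
      rw [if_neg (by simp [List.isEmpty_iff, hof]),
        if_neg (by simp [List.isEmpty_iff, habs])]

-- on pyRange a n 1 the first nonempty level is minimal among levels ≥ a
theorem pvFirstLevel_min (s1L s2L : List Char) (n : Int) :
    ∀ (d : Nat) (a : Int), 1 ≤ a → (n - a).toNat ≤ d →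
      (∃ i ∈ PySem.List.pyRange a n 1, pvAbsent s1L s2L i.toNat ≠ []) →
      a.toNat ≤ pvFirstLevel s1L s2L (PySem.List.pyRange a n 1) ∧
      ((pvFirstLevel s1L s2L (PySem.List.pyRange a n 1) : Int) < n) ∧
      pvAbsent s1L s2L (pvFirstLevel s1L s2L (PySem.List.pyRange a n 1)) ≠ [] ∧
      ∀ m : Nat, a.toNat ≤ m → m < pvFirstLevel s1L s2L (PySem.List.pyRange a n 1) →
        pvAbsent s1L s2L m = [] := by
  intro d
  induction d with
  | zero =>
    intro a ha hd hex
    obtain ⟨i, hi, _⟩ := hex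
    have := (PySem.List.mem_pyRange_one).mp hi
    omega
  | succ d ih =>
    intro a ha hd hex
    have halt : a < n := by
      obtain ⟨i, hi, _⟩ := hex
      have := (PySem.List.mem_pyRange_one).mp hi
      omega
    rw [PySem.List.pyRange_one_cons halt] at hex ⊢
    simp only [pvFirstLevel]
    by_cases habs : pvAbsent s1L s2L a.toNat = []
    · rw [if_pos (by simp [List.isEmpty_iff, habs])]
      have hex' : ∃ i ∈ PySem.List.pyRange (a + 1) n 1, pvAbsent s1L s2L i.toNat ≠ [] := by
        obtain ⟨i, hi, hne⟩ := hex
        rcases List.mem_cons.mp hi with h | h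
        · exact absurd (h ▸ habs) hne
        · exact ⟨i, h, hne⟩
      obtain ⟨h1, h2, h3, h4⟩ := ih (a + 1) (by omega) (by omega) hex'
      refine ⟨by omega, h2, h3, ?_⟩
      intro m hm1 hm2
      by_cases hma : m = a.toNat
      · exact hma ▸ habs
      · exact h4 m (by omega) hm2
    · rw [if_neg (by simp [List.isEmpty_iff, habs])]
      exact ⟨le_refl _, by omega, habs, fun m hm1 hm2 => absurd hm1 (by omega)⟩

-- ---- B side ----

-- occurrence is closed under shortening the slice
theorem pvPresent_mono (s1L s2L : List Char) (j K L : Nat) (hKL : K ≤ L)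
    (h : PySem.Chars.isIn ((s1L.drop j).take L) s2L = true) :
    PySem.Chars.isIn ((s1L.drop j).take K) s2L = true := by
  rw [PySem.Chars.isIn_iff_infix] at h ⊢
  refine List.IsInfix.trans ?_ h
  have : ((s1L.drop j).take L).take K = (s1L.drop j).take K := by
    rw [List.take_take, Nat.min_eq_left hKL]
  rw [← this]
  exact (List.take_prefix _ _).isInfix

-- the while loop: everything before the stop is present (and in range); the stop is absent
theorem pvExtend_spec (s1L s2L : List Char) (j : Nat) :
    ∀ (f L : Nat), s1L.length + 1 ≤ L + j + f →
      L ≤ pvExtend s1L s2L j f L ∧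
      (∀ L', L ≤ L' → L' < pvExtend s1L s2L j f L →
        L' + j ≤ s1L.length ∧ PySem.Chars.isIn ((s1L.drop j).take L') s2L = true) ∧
      (pvExtend s1L s2L j f L + j ≤ s1L.length →
        PySem.Chars.isIn ((s1L.drop j).take (pvExtend s1L s2L j f L)) s2L = false) := by
  intro f
  induction f with
  | zero =>
    intro L hfuel
    simp only [pvExtend]
    exact ⟨le_refl _, fun L' h1 h2 => absurd h1 (by omega), fun h => absurd h (by omega)⟩
  | succ f ih =>
    intro L hfuel
    simp only [pvExtend]
    by_cases hc : L + j ≤ s1L.length ∧ PySem.Chars.isIn ((s1L.drop j).take L) s2L = true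
    · rw [if_pos hc]
      obtain ⟨h1, h2, h3⟩ := ih (L + 1) (by omega)
      refine ⟨by omega, ?_, h3⟩
      intro L' hL1 hL2
      by_cases hLe : L' = L
      · exact hLe ▸ hc
      · exact h2 L' (by omega) hL2
    · rw [if_neg hc]
      refine ⟨le_refl _, fun L' h1 h2 => absurd h1 (by omega), ?_⟩
      intro hin
      rcases Bool.eq_false_or_eq_true (PySem.Chars.isIn ((s1L.drop j).take L) s2L) with h | h
      · exact absurd ⟨hin, h⟩ hc
      · exact h

-- the shortest absent length starting at j
def pvK (s1L s2L : List Char) (j : Nat) : Nat := pvExtend s1L s2L j s1L.length 1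

-- for an in-range length, absence at start j is exactly pvK j ≤ L
theorem pvK_char (s1L s2L : List Char) (j L : Nat) (hj : j ≤ s1L.length) (hL : 1 ≤ L)
    (hr : L + j ≤ s1L.length) :
    PySem.Chars.isIn ((s1L.drop j).take L) s2L = false ↔ pvK s1L s2L j ≤ L := by
  obtain ⟨h1, h2, h3⟩ := pvExtend_spec s1L s2L j s1L.length 1 (by omega)
  unfold pvK
  constructor
  · intro habs
    by_contra hlt
    have := (h2 L hL (by omega)).2
    rw [habs] at this
    exact Bool.false_ne_true this
  · intro hle
    have habsK : PySem.Chars.isIn ((s1L.drop j).take (pvExtend s1L s2L j s1L.length 1)) s2L = false :=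
      h3 (by omega)
    rcases Bool.eq_false_or_eq_true (PySem.Chars.isIn ((s1L.drop j).take L) s2L) with h | h
    · have := pvPresent_mono s1L s2L j (pvExtend s1L s2L j s1L.length 1) L hle h
      rw [habsK] at this
      exact absurd this Bool.false_ne_true
    · exact h

theorem pvK_pos (s1L s2L : List Char) (j : Nat) : 1 ≤ pvK s1L s2L j := by
  unfold pvK
  exact (pvExtend_spec s1L s2L j s1L.length 1 (by omega)).1

-- membership in pvAbsent from a position witness, and the converse decomposition
theorem pvMem_absent (s1L s2L : List Char) (L j : Nat) (h1 : j + L ≤ s1L.length)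
    (hab : PySem.Chars.isIn ((s1L.drop j).take L) s2L = false) :
    (s1L.drop j).take L ∈ pvAbsent s1L s2L L := by
  refine List.mem_filter.mpr ⟨List.mem_map.mpr ⟨j, List.mem_range.mpr (by omega), rfl⟩, ?_⟩
  simp [hab]

theorem pvAbsent_decomp (s1L s2L : List Char) (L : Nat) (s : List Char)
    (hs : s ∈ pvAbsent s1L s2L L) :
    ∃ j, j + L ≤ s1L.length ∧ s = (s1L.drop j).take L ∧
      PySem.Chars.isIn ((s1L.drop j).take L) s2L = false := by
  obtain ⟨hmem, hfilt⟩ := List.mem_filter.mp hs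
  obtain ⟨j, hj, heq⟩ := List.mem_map.mp hmem
  rw [List.mem_range] at hj
  refine ⟨j, by omega, heq.symm, ?_⟩
  rw [heq]
  simpa using hfilt

-- B's candidates: for each start j with a short enough absent extension, (length, string)
def pvCandList (s1L s2L : List Char) : List (Nat × List Char) :=
  (List.range s1L.length).filterMap (fun j =>
    if pvExtend s1L s2L j s1L.length 1 + j ≤ s1L.length
    then some (pvExtend s1L s2L j s1L.length 1,
      (s1L.drop j).take (pvExtend s1L s2L j s1L.length 1)) else none)

def pvStep (x : Option (Nat × List Char)) (c : Nat × List Char) : Option (Nat × List Char) :=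
  match x with
  | none => some c
  | some b => if pvPairLt c b then some c else some b

-- B's loop body is pvStep over the filterMapped candidate stream
theorem pvAltFold_gen (s1L s2L : List Char) :
    ∀ (l : List Nat) (init : Option (Nat × List Char)),
    l.foldl (fun best j =>
        let L := pvExtend s1L s2L j s1L.length 1
        if L + j ≤ s1L.length then
          let cand : Nat × List Char := (L, (s1L.drop j).take L)
          match best with
          | none => some cand
          | some b => if pvPairLt cand b then some cand else some b
        else best) init
      = (l.filterMap (fun j =>
          if pvExtend s1L s2L j s1L.length 1 + j ≤ s1L.length
          then some (pvExtend s1L s2L j s1L.length 1,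
            (s1L.drop j).take (pvExtend s1L s2L j s1L.length 1)) else none)).foldl pvStep init := by
  intro l
  induction l with
  | nil => intro init; rfl
  | cons j l ih =>
    intro init
    rw [List.foldl_cons, List.filterMap_cons]
    by_cases hg : pvExtend s1L s2L j s1L.length 1 + j ≤ s1L.length
    · have hstep : (let L := pvExtend s1L s2L j s1L.length 1
          if L + j ≤ s1L.length then
            let cand : Nat × List Char := (L, (s1L.drop j).take L)
            match init with
            | none => some cand
            | some b => if pvPairLt cand b then some cand else some b
          else init)
          = pvStep init (pvExtend s1L s2L j s1L.length 1,
              (s1L.drop j).take (pvExtend s1L s2L j s1L.length 1)) := by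
        cases init <;> simp [pvStep, if_pos hg]
      rw [hstep, if_pos hg, List.foldl_cons, ih]
    · have hstep : (let L := pvExtend s1L s2L j s1L.length 1
          if L + j ≤ s1L.length then
            let cand : Nat × List Char := (L, (s1L.drop j).take L)
            match init with
            | none => some cand
            | some b => if pvPairLt cand b then some cand else some b
          else init) = init := by
        simp [if_neg hg]
      rw [hstep, if_neg hg, ih]

theorem pvAltFold_eq (s1L s2L : List Char) :
    (List.range s1L.length).foldl (fun best j =>
        let L := pvExtend s1L s2L j s1L.length 1
        if L + j ≤ s1L.length then
          let cand : Nat × List Char := (L, (s1L.drop j).take L)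
          match best with
          | none => some cand
          | some b => if pvPairLt cand b then some cand else some b
        else best) (none : Option (Nat × List Char))
      = (pvCandList s1L s2L).foldl pvStep none := by
  rw [pvCandList]
  exact pvAltFold_gen s1L s2L (List.range s1L.length) none

-- order facts for pvPairLt, via the linear order on List Char
theorem pvPairLt_iff (a b : Nat × List Char) :
    pvPairLt a b = true
      ↔ (a.1 < b.1 ∨ (a.1 = b.1 ∧ @LT.lt (List Char) LinearOrder.toPartialOrder.toLT a.2 b.2)) := by
  simp only [pvPairLt, Bool.or_eq_true, Bool.and_eq_true, decide_eq_true_eq, beq_iff_eq,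
    pvLtIff]

theorem pvPairLt_trans (a b c : Nat × List Char)
    (h1 : pvPairLt a b = true) (h2 : pvPairLt b c = true) : pvPairLt a c = true := by
  rw [pvPairLt_iff] at h1 h2 ⊢
  rcases h1 with h1 | ⟨h1e, h1l⟩ <;> rcases h2 with h2 | ⟨h2e, h2l⟩
  · exact Or.inl (by omega)
  · exact Or.inl (by omega)
  · exact Or.inl (by omega)
  · exact Or.inr ⟨by omega, lt_trans h1l h2l⟩

theorem pvPairLt_neg_trans (a b c : Nat × List Char)
    (h1 : pvPairLt a b = false) (h2 : pvPairLt b c = false) : pvPairLt a c = false := by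
  by_contra h
  rw [Bool.not_eq_false, pvPairLt_iff] at h
  rw [← Bool.not_eq_true, pvPairLt_iff] at h1 h2
  push_neg at h1 h2
  rcases h with h | ⟨he, hl⟩
  · have := h1.1; have := h2.1; omega
  · have hba : b.2 ≤ a.2 := h1.2 (by have := h1.1; have := h2.1; omega)
    have hcb : c.2 ≤ b.2 := h2.2 (by have := h1.1; have := h2.1; omega)
    exact absurd hl (not_lt.mpr (le_trans hcb hba))

theorem pvPairLt_antisymm (a b : Nat × List Char)
    (h1 : pvPairLt a b = false) (h2 : pvPairLt b a = false) : a = b := by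
  rw [← Bool.not_eq_true, pvPairLt_iff] at h1 h2
  push_neg at h1 h2
  have he : a.1 = b.1 := by
    have := h1.1; have := h2.1; omega
  have hs : a.2 = b.2 := le_antisymm (h2.2 he.symm) (h1.2 he)
  exact Prod.ext he hs

-- the running-best fold returns a member that no element beats
theorem pvFoldl_step_spec :
    ∀ (xs : List (Nat × List Char)) (b : Nat × List Char),
      ∃ m, xs.foldl pvStep (some b) = some m ∧ (m = b ∨ m ∈ xs) ∧
        pvPairLt b m = false ∧ ∀ c ∈ xs, pvPairLt c m = false := by
  intro xs
  induction xs with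
  | nil =>
    intro b
    refine ⟨b, rfl, Or.inl rfl, ?_, fun c hc => absurd hc (List.not_mem_nil)⟩
    by_contra h
    rw [Bool.not_eq_false, pvPairLt_iff] at h
    rcases h with h | ⟨_, h⟩
    · omega
    · exact lt_irrefl _ h
  | cons c xs ih =>
    intro b
    simp only [List.foldl_cons, pvStep]
    by_cases hcb : pvPairLt c b = true
    · rw [if_pos hcb]
      obtain ⟨m, hm, hmem, hb, hall⟩ := ih c
      refine ⟨m, hm, ?_, ?_, ?_⟩
      · rcases hmem with h | h
        · exact Or.inr (h ▸ List.mem_cons_self)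
        · exact Or.inr (List.mem_cons_of_mem _ h)
      · by_contra h
        rw [Bool.not_eq_false] at h
        have htr := pvPairLt_trans c b m hcb h
        rw [hb] at htr
        exact Bool.false_ne_true htr
      · intro c' hc'
        rcases List.mem_cons.mp hc' with h | h
        · exact h ▸ hb
        · exact hall c' h
    · rw [if_neg hcb]
      rw [Bool.not_eq_true] at hcb
      obtain ⟨m, hm, hmem, hb, hall⟩ := ih b
      refine ⟨m, hm, ?_, hb, ?_⟩
      · rcases hmem with h | h
        · exact Or.inl h
        · exact Or.inr (List.mem_cons_of_mem _ h)
      · intro c' hc'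
        rcases List.mem_cons.mp hc' with h | h
        · exact h ▸ pvPairLt_neg_trans c b m hcb hb
        · exact hall c' h

-- ---- main equivalence ----

theorem pvMain : ∀ (s1 s2 : String),
    Pre_shortest_non_shared_substring s1 s2 →
    shortest_non_shared_substring s1 s2 = shortest_non_shared_substring_alt s1 s2 := by
  intro s1 s2 hpre
  obtain ⟨iw, hin, hipos, jw, hjw, habsw⟩ := hpre
  unfold shortest_non_shared_substring shortest_non_shared_substring_alt
  simp only [PySem.Chars.len_eq]
  set s1L := s1.toList with hs1L
  set s2L := s2.toList with hs2L
  set n := s1L.length with hn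
  -- the Pre_ witness level is nonempty
  have hlevw : pvAbsent s1L s2L iw ≠ [] := by
    have hmem := pvMem_absent s1L s2L iw jw (by omega)
      ((PySem.Chars.isIn_eq_false_iff _ _).mpr habsw)
    exact List.ne_nil_of_mem hmem
  have hex : ∃ i ∈ PySem.List.pyRange 1 (n : Int) 1, pvAbsent s1L s2L i.toNat ≠ [] := by
    refine ⟨(iw : Int), PySem.List.mem_pyRange_one.mpr ⟨by omega, by omega⟩, ?_⟩
    rw [Int.toNat_natCast]
    exact hlevw
  have hl : ∀ i ∈ PySem.List.pyRange 1 (n : Int) 1, 1 ≤ i :=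
    fun x hx => (PySem.List.mem_pyRange_one.mp hx).1
  -- A's side: first nonempty level k0, value = min of pvAbsent k0
  set k0 := pvFirstLevel s1L s2L (PySem.List.pyRange 1 (n : Int) 1) with hk0
  obtain ⟨hk0ge, hk0lt, hk0ne, hk0min⟩ :=
    pvFirstLevel_min s1L s2L (n : Int) ((n : Int) - 1).toNat 1 (by omega) (by omega) hex
  rw [pvAOuter_eq_firstLevel s1L s2L _ hl hex, pvSortedHead_eq_min _ hk0ne, pvMin_congr]
  have hk0ge1 : 1 ≤ k0 := by simpa using hk0ge
  have hk0ltn : k0 < n := by exact_mod_cast hk0lt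
  -- the min of pvAbsent k0
  cases hv : @PySem.List.min? (List Char) (List Char) LinearOrder.toPartialOrder.toLT
      LinearOrder.toDecidableLT (pvAbsent s1L s2L k0) (fun x => x) with
  | none =>
    exact absurd ((@PySem.List.min?_eq_none_iff (List Char) (List Char)
      LinearOrder.toPartialOrder.toLT LinearOrder.toDecidableLT
      (pvAbsent s1L s2L k0) (fun x => x)).mp hv) hk0ne
  | some v =>
    obtain ⟨j0, hj0n, hveq, hvabs⟩ :=
      pvAbsent_decomp s1L s2L k0 v (@PySem.List.min?_mem (List Char) (List Char)
        LinearOrder.toPartialOrder.toLT LinearOrder.toDecidableLT _ (fun x => x) v hv)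
    have hkj0 : pvK s1L s2L j0 = k0 := by
      have hle : pvK s1L s2L j0 ≤ k0 :=
        (pvK_char s1L s2L j0 k0 (by omega) hk0ge1 (by omega)).mp hvabs
      by_contra hne
      have hlt : pvK s1L s2L j0 < k0 := by omega
      have h1 := pvK_pos s1L s2L j0
      obtain ⟨_, _, h3⟩ := pvExtend_spec s1L s2L j0 s1L.length 1 (by omega)
      have habsK : PySem.Chars.isIn ((s1L.drop j0).take (pvK s1L s2L j0)) s2L = false :=
        h3 (by unfold pvK at hlt; omega)
      have hmem := pvMem_absent s1L s2L (pvK s1L s2L j0) j0 (by unfold pvK at hlt ⊢; omega) habsK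
      rw [hk0min (pvK s1L s2L j0) (by omega) hlt] at hmem
      exact absurd hmem List.not_mem_nil
    -- (k0, v) is one of B's candidates
    have hcand : ((k0, v) : Nat × List Char) ∈ pvCandList s1L s2L := by
      rw [pvCandList]
      refine List.mem_filterMap.mpr ⟨j0, List.mem_range.mpr (by omega), ?_⟩
      rw [show pvExtend s1L s2L j0 s1L.length 1 = pvK s1L s2L j0 from rfl, hkj0,
        if_pos (by omega : k0 + j0 ≤ s1L.length), hveq]
    -- every candidate (L, s) has k0 ≤ L, and at L = k0 the string is in pvAbsent k0
    have hcand_ge : ∀ c ∈ pvCandList s1L s2L, k0 ≤ c.1 ∧ (c.1 = k0 → c.2 ∈ pvAbsent s1L s2L k0) := by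
      intro c hc
      rw [pvCandList] at hc
      obtain ⟨j, hjr, hcj⟩ := List.mem_filterMap.mp hc
      rw [List.mem_range] at hjr
      by_cases hg : pvExtend s1L s2L j s1L.length 1 + j ≤ s1L.length
      · rw [if_pos hg] at hcj
        obtain rfl := Option.some.inj hcj
        obtain ⟨_, _, h3⟩ := pvExtend_spec s1L s2L j s1L.length 1 (by omega)
        have habsK : PySem.Chars.isIn ((s1L.drop j).take (pvK s1L s2L j)) s2L = false :=
          h3 (by omega)
        have hmem := pvMem_absent s1L s2L (pvK s1L s2L j) j (by unfold pvK; omega) habsK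
        have hKpos := pvK_pos s1L s2L j
        have hge : k0 ≤ pvK s1L s2L j := by
          by_contra hlt
          rw [hk0min (pvK s1L s2L j) (by omega) (by omega)] at hmem
          exact absurd hmem List.not_mem_nil
        constructor
        · show k0 ≤ pvExtend s1L s2L j s1L.length 1
          unfold pvK at hge
          omega
        · intro heq
          have heqX : pvExtend s1L s2L j s1L.length 1 = k0 := heq
          have heqK : pvK s1L s2L j = k0 := heq
          rw [heqK] at hmem
          show (s1L.drop j).take (pvExtend s1L s2L j s1L.length 1) ∈ pvAbsent s1L s2L k0
          rw [heqX]
          exact hmem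
      · rw [if_neg hg] at hcj
        exact absurd hcj (by simp)
    -- B's fold returns exactly (k0, v)
    have hnonnil : pvCandList s1L s2L ≠ [] := List.ne_nil_of_mem hcand
    rw [pvAltFold_eq s1L s2L]
    cases hcl : pvCandList s1L s2L with
    | nil => exact absurd hcl hnonnil
    | cons c0 rest =>
      rw [List.foldl_cons]
      have hstep : pvStep none c0 = some c0 := rfl
      rw [hstep]
      obtain ⟨m, hmfold, hmmem, hmb, hmall⟩ := pvFoldl_step_spec rest c0
      rw [hmfold]
      have hmin_all : ∀ c ∈ pvCandList s1L s2L, pvPairLt c m = false := by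
        intro c hc
        rw [hcl] at hc
        rcases List.mem_cons.mp hc with h | h
        · exact h ▸ hmb
        · exact hmall c h
      have hm_mem : m ∈ pvCandList s1L s2L := by
        rw [hcl]
        rcases hmmem with h | h
        · exact h ▸ List.mem_cons_self
        · exact List.mem_cons_of_mem _ h
      -- m is not beaten by (k0, v); and m does not beat (k0, v)
      have h1 : pvPairLt (k0, v) m = false := hmin_all _ hcand
      have h2 : pvPairLt m (k0, v) = false := by
        obtain ⟨hge, hat⟩ := hcand_ge m hm_mem
        by_contra h
        rw [Bool.not_eq_false, pvPairLt_iff] at h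
        rcases h with h | ⟨he, hl2⟩
        · simp only at h; omega
        · simp only at he hl2
          have hmem2 := hat he
          have hle2 := PySem.List.min?_isMin hv m.2 hmem2
          exact absurd hl2 (not_lt.mpr (by simpa using hle2))
      have : m = (k0, v) := pvPairLt_antisymm m (k0, v) h2 h1
      rw [this]
      rfl

-- ===== VERDICT (by name: the statement is the Claim_ definition above) =====
theorem shortest_non_shared_substring_spec : Claim_equal_shortest_non_shared_substring := by
  intro s1 s2 _ hpre
  exact pvMain s1 s2 hpre
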